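-- pv_equiv track=rewrite | github.com/luafabio/2024 | day1/main.py | ej2
-- ===== SOURCE A (Python) =====
-- def ej2(array1, array2):
--     array_result = []
--     result = 0
--     for i in range(len(array1)):
--         array_result.append(array1[i] * array2.count(array1[i]))
--     for n in array_result:
--         result += n
--     return result
-- ===== SOURCE B (Python) =====
-- def ej2(array1, array2):
--     s1 = sorted(array1)
--     s2 = sorted(array2)
--     total = 0
--     i, j = 0, 0
--     while i < len(s1) and j < len(s2):
--         if s1[i] < s2[j]:
--             i += 1
--         elif s2[j] < s1[i]:
--             j += 1
--         else:
--             v = s1[i]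
--             c1 = 0
--             while i < len(s1) and s1[i] == v:
--                 i += 1
--                 c1 += 1
--             c2 = 0
--             while j < len(s2) and s2[j] == v:
--                 j += 1
--                 c2 += 1
--             total += v * c1 * c2
--     return total
-- ===== Notes on version B (the rewrite author's own statement) =====
-- stated objective: faster
-- what changed: Replaces the per-element array2.count rescan (then a second summing loop) by sorting both lists once and doing a single two-pointer merge pass that adds value*run1*run2 per common value.
import Mathlib
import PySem

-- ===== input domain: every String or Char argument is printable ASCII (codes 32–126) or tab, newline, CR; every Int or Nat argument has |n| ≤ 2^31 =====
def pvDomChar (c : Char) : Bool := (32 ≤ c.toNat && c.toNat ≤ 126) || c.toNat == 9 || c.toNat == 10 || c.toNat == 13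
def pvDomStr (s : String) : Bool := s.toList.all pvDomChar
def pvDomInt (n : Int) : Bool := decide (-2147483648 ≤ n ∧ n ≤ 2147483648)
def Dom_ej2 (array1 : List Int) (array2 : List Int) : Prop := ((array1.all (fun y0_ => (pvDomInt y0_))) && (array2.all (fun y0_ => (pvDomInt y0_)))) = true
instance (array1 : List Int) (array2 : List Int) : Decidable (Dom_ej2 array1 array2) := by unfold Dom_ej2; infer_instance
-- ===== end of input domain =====

-- B replaces A's per-element array2.count rescan (then a second summing loop) by sorting both
-- lists once and a single two-pointer merge pass adding value*run1*run2 per common value; objective: faster.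

-- ===== PORT A =====
def ej2 (array1 : List Int) (array2 : List Int) : Int :=
  -- array_result = []; for i in range(len(array1)): array_result.append(array1[i] * array2.count(array1[i]))
  let array_result : List Int :=
    (PySem.List.pyRange 0 (array1.length : Int) 1).foldl
      (fun acc i => acc ++ [PySem.List.pyGetD array1 i 0 * PySem.List.count array2 (PySem.List.pyGetD array1 i 0)]) []
  -- result = 0; for n in array_result: result += n
  array_result.foldl (fun result n => result + n) 0

-- ===== PORT B =====
-- inner 'while … == v: i += 1; c += 1' loop of Source B: run length of v at the front …
def runLen (v : Int) : List Int → Nat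
  | [] => 0
  | x :: xs => if x = v then runLen v xs + 1 else 0

-- … and the position the index ends at (the rest of the list past the run)
def dropRun (v : Int) : List Int → List Int
  | [] => []
  | x :: xs => if x = v then dropRun v xs else x :: xs

theorem dropRun_length_le (v : Int) (l : List Int) : (dropRun v l).length ≤ l.length := by
  induction l with
  | nil => simp [dropRun]
  | cons x xs ih =>
    simp only [dropRun]
    split
    · exact le_trans ih (Nat.le_succ _)
    · simp

-- the outer while loop of Source B over the two sorted lists
def mergeCount : List Int → List Int → Int
  | [], _ => 0
  | _ :: _, [] => 0
  | x :: xs, y :: ys =>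
    if _h1 : x < y then mergeCount xs (y :: ys)
    else if _h2 : y < x then mergeCount (x :: xs) ys
    else
      x * ((runLen x (x :: xs) : Int)) * ((runLen x (y :: ys) : Int))
        + mergeCount (dropRun x (x :: xs)) (dropRun x (y :: ys))
termination_by l1 l2 => l1.length + l2.length
decreasing_by
  all_goals simp only [List.length_cons]
  · omega
  · omega
  · have hyx : y = x := le_antisymm (not_lt.mp _h1) (not_lt.mp _h2)
    subst hyx
    have d1 := dropRun_length_le y xs
    have d2 := dropRun_length_le y ys
    simp only [dropRun, if_true] at *
    simp at *
    omega

def ej2_alt (array1 : List Int) (array2 : List Int) : Int :=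
  let s1 := PySem.List.sorted array1 (fun x => x) false
  let s2 := PySem.List.sorted array2 (fun x => x) false
  mergeCount s1 s2

-- ===== PRECONDITION & SPEC =====
def Spec_ej2 (array1 : List Int) (array2 : List Int) (out : Int) : Prop := out = ej2_alt array1 array2
instance (array1 : List Int) (array2 : List Int) (out : Int) : Decidable (Spec_ej2 array1 array2 out) := by unfold Spec_ej2; infer_instance

-- ===== CLAIM (what is proved, stated in full; the proofs are below) =====
def Claim_equal_ej2 : Prop := ∀ (array1 : List Int) (array2 : List Int), Dom_ej2 array1 array2 → Spec_ej2 array1 array2 (ej2 array1 array2)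

-- ===== LEMMAS AND PROOFS =====

theorem ej2_eq (array1 array2 : List Int) :
    ej2 array1 array2 = array1.foldl (fun r x => r + x * (List.count x array2 : Int)) 0 := by
  unfold ej2
  rw [PySem.List.foldl_pyRange_zero_pyGetD' array1 0
        (fun acc x => acc ++ [x * PySem.List.count array2 x]) []]
  rw [PySem.List.foldl_append_singleton_eq_map]
  simp only [List.nil_append, List.foldl_map, PySem.List.count_eq]

theorem foldl_add_eq_sum (f : Int → Int) (l : List Int) (a : Int) :
    l.foldl (fun r x => r + f x) a = a + (l.map f).sum := by
  induction l generalizing a with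
  | nil => simp
  | cons x xs ih => simp [List.foldl_cons, ih, add_assoc]

theorem replicate_runLen_append_dropRun (v : Int) (l : List Int) :
    List.replicate (runLen v l) v ++ dropRun v l = l := by
  induction l with
  | nil => simp [runLen, dropRun]
  | cons x xs ih =>
    by_cases h : x = v
    · subst h; simp [runLen, dropRun, List.replicate_succ, ih]
    · simp [runLen, dropRun, h]

theorem dropRun_gt (v : Int) (l : List Int) (hs : l.Pairwise (· ≤ ·))
    (hle : ∀ e ∈ l, v ≤ e) : ∀ e ∈ dropRun v l, v < e := by
  induction l with
  | nil => simp [dropRun]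
  | cons x xs ih =>
    rcases List.pairwise_cons.mp hs with ⟨hx, hxs⟩
    by_cases h : x = v
    · subst h
      simp only [dropRun, if_pos]
      exact ih hxs (fun e he => hx e he)
    · have hvx : v < x := lt_of_le_of_ne (hle x (by simp)) (fun h' => h h'.symm)
      simp only [dropRun, if_neg h]
      intro e he
      rcases List.mem_cons.mp he with rfl | he'
      · exact hvx
      · exact lt_of_lt_of_le hvx (hx e he')

-- the heart: on sorted lists the merge computes Σ_{x ∈ l1} x · count(x, l2)
theorem mergeCount_eq (l1 l2 : List Int) (h1 : l1.Pairwise (· ≤ ·)) (h2 : l2.Pairwise (· ≤ ·)) :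
    mergeCount l1 l2 = (l1.map (fun x => x * (List.count x l2 : Int))).sum := by
  induction l1, l2 using mergeCount.induct with
  | case1 l2 => simp [mergeCount]
  | case2 x xs => simp [mergeCount]
  | case3 x xs y ys hxy ih =>
    rcases List.pairwise_cons.mp h1 with ⟨hx, hxs⟩
    -- count x (y::ys) = 0 since every element is ≥ y > x
    have hall : ∀ e ∈ y :: ys, x < e := by
      intro e he
      rcases List.mem_cons.mp he with rfl | he'
      · exact hxy
      · exact lt_of_lt_of_le hxy ((List.pairwise_cons.mp h2).1 e he')
    have hcnt : List.count x (y :: ys) = 0 :=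
      List.count_eq_zero.mpr (fun hm => lt_irrefl x (hall x hm))
    rw [mergeCount, dif_pos hxy, ih hxs h2]
    simp [hcnt]
  | case4 x xs y ys hxy hyx ih =>
    have hyx' : y < x := hyx
    rcases List.pairwise_cons.mp h1 with ⟨hx, hxs⟩
    have hys : ys.Pairwise (· ≤ ·) := (List.pairwise_cons.mp h2).2
    rw [mergeCount, dif_neg hxy, dif_pos hyx', ih h1 hys]
    -- every element of x::xs is > y, so its count in y::ys equals its count in ys
    congr 1
    apply List.map_congr_left
    intro e he
    have hye : y < e := by
      rcases List.mem_cons.mp he with rfl | he'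
      · exact hyx'
      · exact lt_of_lt_of_le hyx' (hx e he')
    rw [List.count_cons]
    simp [Ne.symm (ne_of_gt hye)]
  | case5 x xs y ys hxy hyx ih =>
    have hey : x = y := le_antisymm (not_lt.mp hyx) (not_lt.mp hxy)
    subst hey
    rcases List.pairwise_cons.mp h1 with ⟨hx1, hxs⟩
    rcases List.pairwise_cons.mp h2 with ⟨hx2, hys⟩
    set c1 := runLen x (x :: xs) with hc1
    set c2 := runLen x (x :: ys) with hc2
    set l1' := dropRun x (x :: xs) with hl1'
    set l2' := dropRun x (x :: ys) with hl2'
    have hsplit1 : List.replicate c1 x ++ l1' = x :: xs := replicate_runLen_append_dropRun x _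
    have hsplit2 : List.replicate c2 x ++ l2' = x :: ys := replicate_runLen_append_dropRun x _
    have hle1 : ∀ e ∈ (x :: xs), x ≤ e := by
      intro e he; rcases List.mem_cons.mp he with rfl | he'
      · exact le_refl _
      · exact hx1 e he'
    have hle2 : ∀ e ∈ (x :: ys), x ≤ e := by
      intro e he; rcases List.mem_cons.mp he with rfl | he'
      · exact le_refl _
      · exact hx2 e he'
    have hgt1 : ∀ e ∈ l1', x < e := dropRun_gt x _ h1 hle1
    have hgt2 : ∀ e ∈ l2', x < e := dropRun_gt x _ h2 hle2
    have hp1' : l1'.Pairwise (· ≤ ·) := by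
      have : (List.replicate c1 x ++ l1').Pairwise (· ≤ ·) := hsplit1 ▸ h1
      exact (List.pairwise_append.mp this).2.1
    have hp2' : l2'.Pairwise (· ≤ ·) := by
      have : (List.replicate c2 x ++ l2').Pairwise (· ≤ ·) := hsplit2 ▸ h2
      exact (List.pairwise_append.mp this).2.1
    -- count x (x::ys) = c2
    have hcount2 : List.count x (x :: ys) = c2 := by
      rw [← hsplit2, List.count_append, List.count_replicate_self,
        List.count_eq_zero.mpr (fun hm => lt_irrefl x (hgt2 x hm))]
      simp
    -- for e > x, count e (x::ys) = count e l2'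
    have hcnt_drop : ∀ e, x < e → (List.count e (x :: ys) : Int) = List.count e l2' := by
      intro e hxe
      rw [← hsplit2, List.count_append, List.count_replicate]
      simp only [Nat.cast_add]
      have : ¬ x = e := ne_of_lt hxe
      simp [this]
    rw [mergeCount, dif_neg hxy, dif_neg hyx, ih hp1' hp2']
    -- rewrite the RHS sum using the split of l1
    conv_rhs => rw [← hsplit1]
    rw [List.map_append, List.sum_append, List.map_replicate, List.sum_replicate]
    have hmapeq :
        (l1'.map fun e => e * (List.count e (x :: ys) : Int))
          = l1'.map fun e => e * (List.count e l2' : Int) := by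
      apply List.map_congr_left
      intro e he
      rw [hcnt_drop e (hgt1 e he)]
    rw [hmapeq, hcount2]
    ring

theorem ej2_alt_eq (array1 array2 : List Int) :
    ej2_alt array1 array2 = (array1.map (fun x => x * (List.count x array2 : Int))).sum := by
  unfold ej2_alt
  have hp1 : (PySem.List.sorted array1 (fun x => x) false).Pairwise (· ≤ ·) :=
    PySem.List.sorted_pairwise array1 (fun x => x)
  have hp2 : (PySem.List.sorted array2 (fun x => x) false).Pairwise (· ≤ ·) :=
    PySem.List.sorted_pairwise array2 (fun x => x)
  have hperm1 : (PySem.List.sorted array1 (fun x => x) false).Perm array1 :=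
    PySem.List.sorted_perm array1 (fun x => x) false
  have hperm2 : (PySem.List.sorted array2 (fun x => x) false).Perm array2 :=
    PySem.List.sorted_perm array2 (fun x => x) false
  rw [mergeCount_eq _ _ hp1 hp2]
  have hcnt : ∀ x : Int, List.count x (PySem.List.sorted array2 (fun x => x) false) = List.count x array2 :=
    fun x => hperm2.count_eq x
  calc ((PySem.List.sorted array1 (fun x => x) false).map
          (fun x => x * (List.count x (PySem.List.sorted array2 (fun x => x) false) : Int))).sum
      = ((PySem.List.sorted array1 (fun x => x) false).map
          (fun x => x * (List.count x array2 : Int))).sum := by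
        congr 1; apply List.map_congr_left; intro e _; rw [hcnt e]
    _ = (array1.map (fun x => x * (List.count x array2 : Int))).sum :=
        (hperm1.map _).sum_eq

-- ===== VERDICT (by name: the statement is the Claim_ definition above) =====
theorem ej2_spec : Claim_equal_ej2 := by
  intro a1 a2 _
  unfold Spec_ej2
  rw [ej2_eq, ej2_alt_eq, foldl_add_eq_sum, zero_add]
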